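-- pv_equiv track=rewrite | github.com/dynamicway/algorithm | algospot/wild_card.py | split_wildcard
-- ===== SOURCE A (Python) =====
-- def split_wildcard(w):
--     result = []
--     current = ''
--     for char in w:
--         current += char
--         if char == '*':
--             result.append(current)
--             current = ''
--
--     if current != '':
--         result.append(current)
--     return result
-- ===== SOURCE B (Python) =====
-- def split_wildcard(w):
--     parts = w.split('*')
--     result = [p + '*' for p in parts[:-1]]
--     if parts[-1]:
--         result.append(parts[-1])
--     return result
-- ===== Notes on version B (the rewrite author's own statement) =====
-- stated objective: idiomatic
-- what changed: Replaces the char-by-char accumulator loop with the library string splitter on the star character followed by reattaching the star to every piece but the last and keeping the last piece only if non-empty.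
import Mathlib
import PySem

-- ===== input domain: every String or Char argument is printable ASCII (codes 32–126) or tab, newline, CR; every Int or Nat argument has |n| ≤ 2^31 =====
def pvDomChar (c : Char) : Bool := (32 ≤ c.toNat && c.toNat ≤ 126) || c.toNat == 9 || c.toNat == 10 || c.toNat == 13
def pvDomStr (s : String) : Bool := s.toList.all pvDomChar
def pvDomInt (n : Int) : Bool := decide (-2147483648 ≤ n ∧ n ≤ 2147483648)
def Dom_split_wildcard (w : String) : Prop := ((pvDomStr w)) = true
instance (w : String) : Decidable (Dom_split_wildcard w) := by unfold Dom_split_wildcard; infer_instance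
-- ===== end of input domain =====

-- B replaces A's char-by-char accumulator loop with split('*') plus reconstruction (idiomatic).

-- ===== PORT A =====
def split_wildcard (w : String) : List String :=
  let st := w.toList.foldl
    (fun (st : List (List Char) × List Char) (c : Char) =>
      let current := st.2 ++ [c]
      if c = '*' then (st.1 ++ [current], ([] : List Char)) else (st.1, current))
    (([] : List (List Char)), ([] : List Char))
  (if st.2 ≠ [] then st.1 ++ [st.2] else st.1).map String.mk

-- ===== PORT B =====
-- w.split('*') is ported as List.splitOn '*' on the char list (Python-exact for a one-char separator).
def split_wildcard_alt (w : String) : List String :=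
  let parts := w.toList.splitOn '*'
  let result := parts.dropLast.map (fun p => String.mk (p ++ ['*']))
  if parts.getLastD [] ≠ [] then result ++ [String.mk (parts.getLastD [])] else result

-- ===== PRECONDITION & SPEC =====
def Spec_split_wildcard (w : String) (out : List String) : Prop := out = split_wildcard_alt w
instance (w : String) (out : List String) : Decidable (Spec_split_wildcard w out) := by unfold Spec_split_wildcard; infer_instance

-- ===== CLAIM (what is proved, stated in full; the proofs are below) =====
def Claim_equal_split_wildcard : Prop := ∀ (w : String), Dom_split_wildcard w → Spec_split_wildcard w (split_wildcard w)

-- ===== LEMMAS AND PROOFS =====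

def pvStep (st : List (List Char) × List Char) (c : Char) : List (List Char) × List Char :=
  let current := st.2 ++ [c]
  if c = '*' then (st.1 ++ [current], ([] : List Char)) else (st.1, current)

def pvFinish (st : List (List Char) × List Char) : List (List Char) :=
  if st.2 ≠ [] then st.1 ++ [st.2] else st.1

def pvRebuild (parts : List (List Char)) : List (List Char) :=
  parts.dropLast.map (fun p => p ++ ['*']) ++
    (if parts.getLastD [] ≠ [] then [parts.getLastD []] else [])

theorem pvModifyHead_triv (l : List (List Char)) :
    l.modifyHead (fun x => x) = l := by
  cases l <;> simp

theorem pvSplitOn_ne_nil (cs : List Char) : cs.splitOn '*' ≠ [] := by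
  simp [List.splitOn]
  exact List.splitOnP_ne_nil _ _

theorem pvMain (cs : List Char) (res : List (List Char)) (cur : List Char) :
    pvFinish (cs.foldl pvStep (res, cur)) =
      res ++ pvRebuild ((cs.splitOn '*').modifyHead (cur ++ ·)) := by
  induction cs generalizing res cur with
  | nil =>
    simp [pvFinish, pvRebuild, List.splitOn]
    by_cases h : cur = [] <;> simp [h]
  | cons c cs ih =>
    by_cases hc : c = '*'
    · subst hc
      have h1 : ('*' :: cs).splitOn '*' = [] :: cs.splitOn '*' := by
        simp [List.splitOn, List.splitOnP_cons]
      rw [List.foldl_cons]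
      have hstep : pvStep (res, cur) '*' = (res ++ [cur ++ ['*']], ([] : List Char)) := by
        simp [pvStep]
      rw [hstep, ih, h1]
      have h2 : (cs.splitOn '*').modifyHead (([] : List Char) ++ ·) = cs.splitOn '*' := by
        simp [pvModifyHead_triv]
      rw [h2]
      obtain ⟨p, ps, hps⟩ := List.exists_cons_of_ne_nil (pvSplitOn_ne_nil cs)
      rw [hps]
      simp [pvRebuild]
    · have h1 : (c :: cs).splitOn '*' = (cs.splitOn '*').modifyHead (c :: ·) := by
        simp [List.splitOn, List.splitOnP_cons, hc]
      rw [List.foldl_cons]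
      have hstep : pvStep (res, cur) c = (res, cur ++ [c]) := by
        simp [pvStep, hc]
      rw [hstep, ih, h1, List.modifyHead_modifyHead]
      have hfun : ((fun x => cur ++ x) ∘ (fun x => c :: x)) = (fun x => (cur ++ [c]) ++ x) := by
        funext x; simp
      rw [hfun]

theorem split_wildcard_eq (w : String) : split_wildcard w = split_wildcard_alt w := by
  show (pvFinish (w.toList.foldl pvStep ([], []))).map String.mk = _
  rw [pvMain w.toList [] []]
  have h2 : (w.toList.splitOn '*').modifyHead (([] : List Char) ++ ·) = w.toList.splitOn '*' := by
    simp [pvModifyHead_triv]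
  rw [h2]
  simp only [split_wildcard_alt, pvRebuild, List.nil_append, List.map_append,
    List.getLastD_eq_getLast?]
  by_cases h : (w.toList.splitOn '*').getLast?.getD [] = [] <;>
    simp [h, List.map_dropLast, Function.comp_def]

-- ===== VERDICT (by name: the statement is the Claim_ definition above) =====
theorem split_wildcard_spec : Claim_equal_split_wildcard := by
  intro w _
  exact split_wildcard_eq w
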